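-- pv_equiv track=rewrite | github.com/leezmc/Name-Numbers | main.py | nameNumber
-- ===== SOURCE A (Python) =====
-- def sumDigits(number):
--     while number >= 10:
--         sum = 0
--         for i in str(number):
--             sum += int(i)
--         number = sum
--     return number
--
-- def nameNumber(name):
--     letterToNumber = {'A': 1, 'B': 2, 'C': 3, 'D': 4, 'E': 5, 'F': 8, 'G': 3, 'H': 5, 'I': 1, 'J': 1, 'K': 2, 'L': 3, 'M': 4,
--                         'N': 5, 'O': 7, 'P': 8, 'Q': 1, 'R': 2, 'S': 3, 'T': 4, 'U': 6, 'V': 6, 'W': 6, 'X': 5, 'Y': 1, 'Z': 7}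
--     name = name.upper()
--     nameNumber = 0
--     for i in name:
--         if i in letterToNumber:
--             nameNumber += letterToNumber[i]
--     nameNumber = sumDigits(nameNumber)
--     return nameNumber
-- ===== SOURCE B (Python) =====
-- LETTERS = "ABCDEFGHIJKLMNOPQRSTUVWXYZ"
-- VALUES = [1, 2, 3, 4, 5, 8, 3, 5, 1, 1, 2, 3, 4, 5, 7, 8, 1, 2, 3, 4, 6, 6, 6, 5, 1, 7]
--
--
-- def nameNumber(name):
--     up = name.upper()
--     total = sum(v * up.count(c) for c, v in zip(LETTERS, VALUES))
--     return 0 if total == 0 else 1 + (total - 1) % 9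
-- ===== Notes on version B (the rewrite author's own statement) =====
-- stated objective: alternative
-- what changed: B loops over the 26-letter value table counting each letter's occurrences in the uppercased name (sum of value * count) instead of A's per-character dict-lookup accumulation, and replaces A's iterative repeated digit-sum loop (sumDigits) with the closed-form digital root 0 if total == 0 else 1 + (total - 1) % 9.
import Mathlib
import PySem

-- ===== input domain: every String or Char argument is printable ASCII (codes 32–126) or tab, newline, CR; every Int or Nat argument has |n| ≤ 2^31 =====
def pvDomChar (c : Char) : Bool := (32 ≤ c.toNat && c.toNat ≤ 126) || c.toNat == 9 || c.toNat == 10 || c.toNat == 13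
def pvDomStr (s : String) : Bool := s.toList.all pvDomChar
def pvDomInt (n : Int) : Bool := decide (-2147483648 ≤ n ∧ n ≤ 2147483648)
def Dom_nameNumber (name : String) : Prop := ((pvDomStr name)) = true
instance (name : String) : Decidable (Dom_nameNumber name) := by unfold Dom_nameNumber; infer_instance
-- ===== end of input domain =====

-- B sums value * count over the 26-letter table (instead of per-character dict lookups)
-- and replaces A's iterative repeated digit-sum loop by the closed-form digital root.


-- ===== PORT A =====
-- A's dict literal letterToNumber
def letterToNumberTable : PySem.Dict Char Int :=
  PySem.Dict.ofList [('A',1),('B',2),('C',3),('D',4),('E',5),('F',8),('G',3),('H',5),('I',1),('J',1),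
                     ('K',2),('L',3),('M',4),('N',5),('O',7),('P',8),('Q',1),('R',2),('S',3),('T',4),
                     ('U',6),('V',6),('W',6),('X',5),('Y',1),('Z',7)]

-- one pass of A's while body: 'sum = 0; for i in str(number): sum += int(i)'.
-- int(i) never raises here (str of the nonnegative loop value has only digit chars), so the getD 0 is unreachable.
def sumDigitsBody (number : Int) : Int :=
  (PySem.Int.toChars number).foldl (fun s i => s + (PySem.Int.ofChars? [i]).getD 0) 0

-- A's 'while number >= 10' loop, made total with fuel; number.toNat iterations always suffice
def sumDigitsLoop : Nat → Int → Int
  | 0, number => number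
  | fuel + 1, number =>
      if 10 ≤ number then sumDigitsLoop fuel (sumDigitsBody number) else number

def sumDigits (number : Int) : Int := sumDigitsLoop number.toNat number

def nameNumber (name : String) : Int :=
  let acc := (PySem.Str.upper name).toList.foldl
    (fun acc i => if letterToNumberTable.contains i then acc + letterToNumberTable.getD i 0 else acc) 0
  sumDigits acc

-- ===== PORT B =====
-- Source B's module constants LETTERS and VALUES
def lettersB : List Char := ['A','B','C','D','E','F','G','H','I','J','K','L','M',
                             'N','O','P','Q','R','S','T','U','V','W','X','Y','Z']
def valuesB : List Int := [1, 2, 3, 4, 5, 8, 3, 5, 1, 1, 2, 3, 4, 5, 7, 8, 1, 2, 3, 4, 6, 6, 6, 5, 1, 7]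

-- 'up.count(c)' with a single-character needle is exactly the number of occurrences
-- of that character, i.e. List.count on the character list (exact here).
def nameNumber_alt (name : String) : Int :=
  let up := (PySem.Str.upper name).toList
  let total := ((lettersB.zip valuesB).map (fun p => p.2 * (up.count p.1 : Int))).sum
  if total = 0 then 0 else 1 + PySem.Int.mod (total - 1) 9

-- ===== PRECONDITION & SPEC =====
def Spec_nameNumber (name : String) (out : Int) : Prop := out = nameNumber_alt name
instance (name : String) (out : Int) : Decidable (Spec_nameNumber name out) := by unfold Spec_nameNumber; infer_instance

-- ===== CLAIM (what is proved, stated in full; the proofs are below) =====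
def Claim_equal_nameNumber : Prop := ∀ (name : String), Dom_nameNumber name → Spec_nameNumber name (nameNumber name)

-- ===== LEMMAS AND PROOFS =====

-- the ofList literal as a raw association list
set_option maxHeartbeats 1000000 in
theorem table_eq_mk : letterToNumberTable = PySem.Dict.mk
      [('A',1),('B',2),('C',3),('D',4),('E',5),('F',8),('G',3),('H',5),('I',1),('J',1),
       ('K',2),('L',3),('M',4),('N',5),('O',7),('P',8),('Q',1),('R',2),('S',3),('T',4),
       ('U',6),('V',6),('W',6),('X',5),('Y',1),('Z',7)] := by decide

-- an association-list lookup over nonnegative values is nonnegative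
theorem getD_mk_nonneg (c : Char) : ∀ (l : List (Char × Int)), (∀ p ∈ l, 0 ≤ p.2) →
    0 ≤ ((PySem.Dict.mk l).get? c).getD 0 := by
  intro l
  induction l with
  | nil => intro _; simp [PySem.Dict.get?]
  | cons p rest ih =>
    intro h
    obtain ⟨k, v⟩ := p
    rw [PySem.Dict.get?_mk_cons]
    by_cases hk : k == c
    · simpa [hk] using h (k, v) (by simp)
    · simp only [hk, if_false, Bool.false_eq_true]
      exact ih (fun q hq => h q (by simp [hq]))

-- every value the table can yield is nonnegative
theorem table_getD_nonneg (c : Char) : 0 ≤ letterToNumberTable.getD c 0 := by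
  rw [table_eq_mk, PySem.Dict.getD_eq_get?_getD]
  exact getD_mk_nonneg c _ (by decide)

-- A's guarded accumulation equals the sum of table lookups over the characters
theorem fold_eq_sum (l : List Char) :
    l.foldl (fun acc i => if letterToNumberTable.contains i then acc + letterToNumberTable.getD i 0 else acc) 0
      = (l.map (fun c => letterToNumberTable.getD c 0)).sum := by
  have hfun : (fun (acc : Int) (i : Char) => if letterToNumberTable.contains i then acc + letterToNumberTable.getD i 0 else acc)
      = fun acc i => acc + letterToNumberTable.getD i 0 := by
    funext acc i
    by_cases h : letterToNumberTable.contains i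
    · simp [h]
    · simp only [Bool.not_eq_true] at h
      simp [h, PySem.Dict.getD_of_not_contains letterToNumberTable 0 h]
  rw [hfun, PySem.List.foldl_add]
  simp

-- B's table slice at one character: the zip-sum of 'value if letter = c' is A's dict lookup
theorem zip_pick_eq_getD (c : Char) :
    ((lettersB.zip valuesB).map (fun p => if p.1 = c then p.2 else 0)).sum
      = letterToNumberTable.getD c 0 := by
  by_cases hc : c ∈ lettersB
  · fin_cases hc <;> decide
  · have hz : ((lettersB.zip valuesB).map (fun p => if p.1 = c then p.2 else 0)).sum = 0 := by
      apply List.sum_eq_zero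
      intro x hx
      simp only [List.mem_map] at hx
      obtain ⟨p, hp, rfl⟩ := hx
      have h1 : p.1 ∈ lettersB := (List.of_mem_zip hp).1
      have hne : ¬ p.1 = c := fun h => hc (h ▸ h1)
      simp [hne]
    have hkeys : (PySem.Dict.mk
        [('A',(1:Int)),('B',2),('C',3),('D',4),('E',5),('F',8),('G',3),('H',5),('I',1),('J',1),
         ('K',2),('L',3),('M',4),('N',5),('O',7),('P',8),('Q',1),('R',2),('S',3),('T',4),
         ('U',6),('V',6),('W',6),('X',5),('Y',1),('Z',7)]).keys = lettersB := by decide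
    rw [hz, table_eq_mk, PySem.Dict.getD_eq_get?_getD,
        (PySem.Dict.get?_eq_none_iff_not_mem_keys _ c).mpr (by rw [hkeys]; exact hc)]
    rfl

-- the per-character lookup sum equals B's value*count sum over the table
theorem sum_getD_eq_zip_count (l : List Char) :
    (l.map (fun c => letterToNumberTable.getD c 0)).sum
      = ((lettersB.zip valuesB).map (fun p => p.2 * (l.count p.1 : Int))).sum := by
  induction l with
  | nil => simp
  | cons c l ih =>
    have hsplit : ∀ p : Char × Int,
        p.2 * (((c :: l).count p.1 : Nat) : Int)
          = p.2 * (l.count p.1 : Int) + (if p.1 = c then p.2 else 0) := by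
      intro p
      rw [List.count_cons]
      by_cases h : p.1 = c
      · simp [h, mul_add]
      · simp [h]
        exact Or.inl fun hcp => h hcp.symm
    simp only [List.map_cons, List.sum_cons, ih]
    rw [show ((lettersB.zip valuesB).map (fun p => p.2 * (((c :: l).count p.1 : Nat) : Int)))
          = ((lettersB.zip valuesB).map (fun p => p.2 * (l.count p.1 : Int) + (if p.1 = c then p.2 else 0)))
        from List.map_congr_left (fun p _ => hsplit p),
        PySem.List.sum_map_add_int, zip_pick_eq_getD]
    ring

-- core's toDigitsCore renders exactly the base-10 digits, most significant first
theorem toDigitsCore_eq_digits : ∀ (fuel n : Nat) (ds : List Char), n ≠ 0 → n < fuel →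
    Nat.toDigitsCore 10 fuel n ds = ((Nat.digits 10 n).map Nat.digitChar).reverse ++ ds := by
  intro fuel
  induction fuel with
  | zero => intro n ds hn hlt; omega
  | succ f ih =>
    intro n ds hn hlt
    rw [Nat.toDigitsCore.eq_def]
    simp only
    rw [Nat.digits_def' (by norm_num : (1:ℕ) < 10) (Nat.pos_of_ne_zero hn)]
    by_cases h : n / 10 = 0
    · simp [h]
    · rw [if_neg h, ih (n / 10) (Nat.digitChar (n % 10) :: ds) h
        (by have := Nat.div_lt_self (Nat.pos_of_ne_zero hn) (by norm_num : (1:ℕ) < 10); omega)]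
      simp

theorem toDigits_eq_digits (n : Nat) (hn : n ≠ 0) :
    Nat.toDigits 10 n = ((Nat.digits 10 n).map Nat.digitChar).reverse := by
  simpa [Nat.toDigits] using toDigitsCore_eq_digits (n + 1) n [] hn (by omega)

-- Python's int() of a single digit character
theorem ofChars_digitChar (d : Nat) (hd : d < 10) :
    (PySem.Int.ofChars? [Nat.digitChar d]).getD 0 = (d : Int) := by
  interval_cases d <;> decide

-- one pass of A's body computes the digit sum of the current value
theorem sumDigitsBody_eq (n : Int) (hn : 1 ≤ n) :
    sumDigitsBody n = ((Nat.digits 10 n.toNat).sum : Int) := by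
  unfold sumDigitsBody
  rw [show PySem.Int.toChars n = Nat.toDigits 10 n.toNat by
        simp [PySem.Int.toChars, show ¬ n < 0 by omega],
      toDigits_eq_digits n.toNat (by omega),
      PySem.List.foldl_add, List.map_reverse, List.sum_reverse, List.map_map]
  have hcongr : List.map ((fun i => (PySem.Int.ofChars? [i]).getD 0) ∘ Nat.digitChar) (Nat.digits 10 n.toNat)
      = List.map (Nat.cast : Nat → Int) (Nat.digits 10 n.toNat) :=
    by
      apply List.map_congr_left
      intro d hd
      have hlt : d < 10 := Nat.digits_lt_base (by norm_num) hd
      simpa [Function.comp] using ofChars_digitChar d hlt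
  rw [hcongr, ← Nat.cast_list_sum]
  simp

-- the digit sum strictly decreases any value ≥ 10
theorem digits_sum_lt (m : Nat) (hm : 10 ≤ m) : (Nat.digits 10 m).sum < m := by
  rw [Nat.digits_def' (by norm_num : (1:ℕ) < 10) (by omega)]
  have h1 : (Nat.digits 10 (m / 10)).sum ≤ m / 10 := Nat.digit_sum_le 10 (m / 10)
  have h2 : 1 ≤ m / 10 := (Nat.one_le_div_iff (by norm_num)).mpr (by omega)
  have h3 := Nat.mod_add_div m 10
  simp only [List.sum_cons]
  omega

-- the digit sum of a positive value is positive
theorem digits_sum_pos (m : Nat) (hm : m ≠ 0) : 0 < (Nat.digits 10 m).sum := by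
  rcases Nat.eq_zero_or_pos (Nat.digits 10 m).sum with h | h
  · exfalso
    have hne := (Nat.digits_ne_nil_iff_ne_zero (b := 10)).mpr hm
    exact Nat.getLast_digit_ne_zero 10 hm
      (List.sum_eq_zero_iff.mp h _ (List.getLast_mem hne))
  · exact h

-- A's while loop computes the digital root: B's closed form
theorem loop_eq_droot : ∀ (fuel : Nat) (n : Int), 0 ≤ n → n.toNat ≤ fuel →
    sumDigitsLoop fuel n = if n = 0 then 0 else 1 + PySem.Int.mod (n - 1) 9 := by
  intro fuel
  induction fuel with
  | zero =>
    intro n h0 hf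
    have : n = 0 := by omega
    simp [this, sumDigitsLoop]
  | succ f ih =>
    intro n h0 hf
    rw [sumDigitsLoop]
    by_cases h10 : 10 ≤ n
    · rw [if_pos h10]
      have hbody := sumDigitsBody_eq n (by omega)
      have hlt := digits_sum_lt n.toNat (by omega)
      have hpos := digits_sum_pos n.toNat (by omega)
      have hmod : (Nat.digits 10 n.toNat).sum % 9 = n.toNat % 9 := (Nat.modEq_nine_digits_sum n.toNat).symm
      set s := (Nat.digits 10 n.toNat).sum with hs
      rw [hbody, ih (s : Int) (by exact_mod_cast Int.natCast_nonneg s) (by omega)]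
      rw [if_neg (by omega : ¬ (s : Int) = 0), if_neg (by omega : ¬ n = 0)]
      rw [PySem.Int.mod_eq_emod_of_pos (by norm_num), PySem.Int.mod_eq_emod_of_pos (by norm_num)]
      omega
    · rw [if_neg h10]
      by_cases h0' : n = 0
      · simp [h0']
      · rw [if_neg h0', PySem.Int.mod_eq_emod_of_pos (by norm_num)]
        omega

-- ===== VERDICT (by name: the statement is the Claim_ definition above) =====
theorem nameNumber_spec : Claim_equal_nameNumber := by
  intro name _
  unfold Spec_nameNumber nameNumber nameNumber_alt sumDigits
  simp only [fold_eq_sum]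
  set t := ((PySem.Str.upper name).toList.map (fun c => letterToNumberTable.getD c 0)).sum with ht
  have htn : 0 ≤ t := List.sum_nonneg (by
    intro x hx
    simp only [List.mem_map] at hx
    obtain ⟨c, _, rfl⟩ := hx
    exact table_getD_nonneg c)
  rw [← sum_getD_eq_zip_count, ← ht]
  exact loop_eq_droot t.toNat t htn le_rfl
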